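-- pv_equiv track=rewrite | github.com/t0r1n88/Lachesis | deviant/vasyagina_olro_mlad.py | calc_value_k
-- ===== SOURCE A (Python) =====
-- def calc_value_k(row):
--     """
--     Функция для подсчета значения
--     :return: число
--     """
--     lst_pr = [5,12,16,24,36,43]
--     lst_neg = []
--     value_forward = 0  # результат
--     for idx, value in enumerate(row,1):
--         if idx in lst_pr:
--             if idx not in lst_neg:
--                 value_forward += value
--             else:
--                 if value == 0:
--                     value_forward += 3
--                 elif value == 1:
--                     value_forward += 2
--                 elif value == 2:
--                     value_forward += 1
--                 elif value == 3:
--                     value_forward += 0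
--     return value_forward
-- ===== SOURCE B (Python) =====
-- def calc_value_k(row):
--     total = 0
--     for i in (4, 11, 15, 23, 35, 42):
--         if i < len(row):
--             total += row[i]
--     return total
-- ===== Notes on version B (the rewrite author's own statement) =====
-- stated objective: faster
-- what changed: Instead of scanning every element of row and testing its 1-based index for membership in a list (with a dead lst_neg branch), B directly reads the six fixed target positions, adding each in-range element; the dead branch is dropped.
import Mathlib
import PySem

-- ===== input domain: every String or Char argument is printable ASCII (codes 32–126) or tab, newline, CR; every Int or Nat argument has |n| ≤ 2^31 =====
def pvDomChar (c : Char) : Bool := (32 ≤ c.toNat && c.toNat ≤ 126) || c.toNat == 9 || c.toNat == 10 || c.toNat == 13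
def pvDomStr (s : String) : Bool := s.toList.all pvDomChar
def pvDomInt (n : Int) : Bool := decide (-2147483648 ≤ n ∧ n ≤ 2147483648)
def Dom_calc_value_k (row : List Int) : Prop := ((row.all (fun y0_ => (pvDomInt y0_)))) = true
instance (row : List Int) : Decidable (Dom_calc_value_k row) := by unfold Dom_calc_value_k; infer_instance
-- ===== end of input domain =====

-- ===== PORT A =====
-- B gathers the six fixed target positions directly instead of scanning every element of row
-- and testing its 1-based index for list membership (simpler; A's dead lst_neg branch is dropped).
def calc_value_k (row : List Int) : Int :=
  (row.zipIdx 1).foldl (fun value_forward p =>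
    if p.2 ∈ ([5, 12, 16, 24, 36, 43] : List Nat) then
      if p.2 ∉ ([] : List Nat) then value_forward + p.1
      else if p.1 = 0 then value_forward + 3
      else if p.1 = 1 then value_forward + 2
      else if p.1 = 2 then value_forward + 1
      else if p.1 = 3 then value_forward + 0
      else value_forward
    else value_forward) 0

-- ===== PORT B =====
def calc_value_k_alt (row : List Int) : Int :=
  ([4, 11, 15, 23, 35, 42] : List Nat).foldl
    (fun total i => if i < row.length then total + row.getD i 0 else total) 0

-- ===== PRECONDITION & SPEC =====
def Spec_calc_value_k (row : List Int) (out : Int) : Prop := out = calc_value_k_alt row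
instance (row : List Int) (out : Int) : Decidable (Spec_calc_value_k row out) := by unfold Spec_calc_value_k; infer_instance

-- ===== CLAIM (what is proved, stated in full; the proofs are below) =====
def Claim_equal_calc_value_k : Prop := ∀ (row : List Int), Dom_calc_value_k row → Spec_calc_value_k row (calc_value_k row)

-- ===== LEMMAS AND PROOFS =====

-- sum of row values at the six 1-based target positions, shifted by a start index k
def pvGather (row : List Int) (k : Nat) : Int :=
  (([5, 12, 16, 24, 36, 43] : List Nat).map
    (fun t => if k ≤ t ∧ t - k < row.length then row.getD (t - k) 0 else 0)).sum

-- one summand of pvGather, peeled for a cons cell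
lemma pvTerm (v : Int) (rest : List Int) (k t : Nat) :
    (if k ≤ t ∧ t - k < (v :: rest).length then (v :: rest).getD (t - k) 0 else 0) =
      (if k = t then v else 0) +
        (if k + 1 ≤ t ∧ t - (k + 1) < rest.length then rest.getD (t - (k + 1)) 0 else 0) := by
  by_cases hkt : k = t
  · subst hkt; simp
  · by_cases hlt : k < t
    · have h1 : t - k = (t - (k + 1)) + 1 := by omega
      rw [h1]
      simp only [List.length_cons, List.getD_cons_succ]
      have hc : (k ≤ t ∧ t - (k + 1) + 1 < rest.length + 1) ↔
          (k + 1 ≤ t ∧ t - (k + 1) < rest.length) := by omega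
      rw [if_neg hkt]; simp only [hc]; ring
    · rw [if_neg hkt, if_neg (by omega : ¬ (k ≤ t ∧ t - k < (v :: rest).length)),
        if_neg (by omega : ¬ (k + 1 ≤ t ∧ t - (k + 1) < rest.length))]
      ring

set_option maxHeartbeats 1000000 in
lemma pvGather_cons (v : Int) (rest : List Int) (k : Nat) :
    pvGather (v :: rest) k =
      (if k ∈ ([5, 12, 16, 24, 36, 43] : List Nat) then v else 0) + pvGather rest (k + 1) := by
  have hM : (if k ∈ ([5, 12, 16, 24, 36, 43] : List Nat) then v else 0) =
      (if k = 5 then v else 0) + (if k = 12 then v else 0) + (if k = 16 then v else 0) +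
        (if k = 24 then v else 0) + (if k = 36 then v else 0) + (if k = 43 then v else 0) := by
    by_cases hk : k ∈ ([5, 12, 16, 24, 36, 43] : List Nat)
    · have h' := hk
      simp only [List.mem_cons, List.not_mem_nil, or_false] at h'
      rcases h' with h | h | h | h | h | h <;> subst h <;> norm_num
    · have h' := hk
      simp only [List.mem_cons, List.not_mem_nil, or_false, not_or] at h'
      obtain ⟨h1, h2, h3, h4, h5, h6⟩ := h'
      rw [if_neg hk, if_neg h1, if_neg h2, if_neg h3, if_neg h4, if_neg h5, if_neg h6]
      ring
  rw [hM]
  simp only [pvGather, List.map_cons, List.map_nil, List.sum_cons, List.sum_nil, pvTerm]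
  ring

-- A's enumerate loop (after the dead lst_neg branch is simplified away) computes pvGather
lemma pvLoop_eq (row : List Int) : ∀ (k : Nat) (acc : Int),
    (row.zipIdx k).foldl (fun value_forward p =>
      if p.2 ∈ ([5, 12, 16, 24, 36, 43] : List Nat) then value_forward + p.1
      else value_forward) acc = acc + pvGather row k := by
  induction row with
  | nil => intro k acc; simp [pvGather]
  | cons v rest ih =>
      intro k acc
      rw [List.zipIdx_cons, List.foldl_cons, ih, pvGather_cons]
      by_cases hk : k ∈ ([5, 12, 16, 24, 36, 43] : List Nat) <;>
        simp only [hk, if_true, if_false] <;> ring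

-- ===== VERDICT (by name: the statement is the Claim_ definition above) =====
theorem calc_value_k_spec : Claim_equal_calc_value_k := by
  intro row _
  show calc_value_k row = calc_value_k_alt row
  have hstep : (fun (value_forward : Int) (p : Int × Nat) =>
      if p.2 ∈ ([5, 12, 16, 24, 36, 43] : List Nat) then
        if p.2 ∉ ([] : List Nat) then value_forward + p.1
        else if p.1 = 0 then value_forward + 3
        else if p.1 = 1 then value_forward + 2
        else if p.1 = 2 then value_forward + 1
        else if p.1 = 3 then value_forward + 0
        else value_forward
      else value_forward) =
      (fun (value_forward : Int) (p : Int × Nat) =>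
        if p.2 ∈ ([5, 12, 16, 24, 36, 43] : List Nat) then value_forward + p.1
        else value_forward) := by
    funext vf p
    simp
  rw [calc_value_k, hstep, pvLoop_eq row 1 0]
  simp only [pvGather, calc_value_k_alt, List.map_cons, List.map_nil, List.sum_cons,
    List.sum_nil, List.foldl_cons, List.foldl_nil]
  norm_num
  split_ifs <;> ring
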